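-- pv_equiv track=rewrite | github.com/TviNet/wavesense | tools/evaluate_mental_model.py | check_mid_stream_reset
-- ===== SOURCE A (Python) =====
-- from typing import Dict, List, Tuple, Optional
--
-- def rising_edges(clk: List[int]) -> List[int]:
--     edges = []
--     for i in range(1, len(clk)):
--         if clk[i - 1] == 0 and clk[i] == 1:
--             edges.append(i)
--     return edges
--
-- def check_mid_stream_reset(series: Dict[str, List[int]]) -> bool:
--     if not all(k in series for k in ("clk", "rst", "count")):
--         return False
--     edges = rising_edges(series["clk"])
--     # Find a posedge where rst goes high for one edge and then low
--     for i in range(1, len(edges) - 1):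
--         e_prev, e, e_next = edges[i - 1], edges[i], edges[i + 1]
--         if series["rst"][e_prev] == 0 and series["rst"][e] == 1 and series["rst"][e_next] == 0:
--             # Count at e must be 0, and then should resume incrementing or at least change thereafter
--             if series["count"][e] != 0:
--                 continue
--             return True
--     return False
-- ===== SOURCE B (Python) =====
-- def check_mid_stream_reset(series):
--     if not all(k in series for k in ("clk", "rst", "count")):
--         return False
--     clk, rst, count = series["clk"], series["rst"], series["count"]
--     prev2 = prev1 = None
--     for i in range(1, len(clk)):
--         if clk[i - 1] == 0 and clk[i] == 1:
--             if prev2 is not None and rst[prev2] == 0 and rst[prev1] == 1 and rst[i] == 0 and count[prev1] == 0: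
--                 return True
--             prev2, prev1 = prev1, i
--     return False
-- ===== Notes on version B (the rewrite author's own statement) =====
-- stated objective: simpler
-- what changed: B drops the separate rising_edges pass and the intermediate edges list, fusing edge detection and the rst/count triple test into a single pass over clk that carries only the last two edge indices.
import Mathlib
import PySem

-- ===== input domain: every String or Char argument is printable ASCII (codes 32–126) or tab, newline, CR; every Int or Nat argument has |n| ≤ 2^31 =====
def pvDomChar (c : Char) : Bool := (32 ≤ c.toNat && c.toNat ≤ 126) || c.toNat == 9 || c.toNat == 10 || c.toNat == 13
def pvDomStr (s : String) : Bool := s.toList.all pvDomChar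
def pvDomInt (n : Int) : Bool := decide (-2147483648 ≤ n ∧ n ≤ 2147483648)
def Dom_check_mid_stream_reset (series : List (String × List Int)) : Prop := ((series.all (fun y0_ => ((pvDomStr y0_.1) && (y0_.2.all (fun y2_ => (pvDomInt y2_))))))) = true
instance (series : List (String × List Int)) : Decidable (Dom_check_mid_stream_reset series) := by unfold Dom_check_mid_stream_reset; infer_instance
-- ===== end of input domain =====

-- B fuses rising-edge detection and the triple test into one pass over clk with a
-- sliding window of the last two edge indices (no intermediate edges list); objective: simpler one-pass decomposition.

-- ===== PORT A =====
-- dict lookup (first match on the association list, as for a Python dict)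
def pvLookupA (series : List (String × List Int)) (k : String) : Option (List Int) :=
  (PySem.Dict.mk series).get? k

-- rising_edges: indices 1..len-1 with clk[i-1]==0 and clk[i]==1 (indices are in range;
-- getD's default is never read there)
def risingEdges (clk : List Int) : List Nat :=
  (List.range' 1 (clk.length - 1)).filter (fun i => clk.getD (i - 1) 9 == 0 && clk.getD i 9 == 1)

-- the for-loop over i in range(1, len(edges)-1); out-of-range rst/count reads (Python: IndexError)
-- are excluded by Pre_, the getD default is never read inside Pre_
def loopA (rst count : List Int) (edges : List Nat) : List Nat → Bool
  | [] => false
  | i :: is =>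
    -- e_prev, e, e_next = edges[i-1], edges[i], edges[i+1], inlined
    if rst.getD (edges.getD (i - 1) 0) 9 == 0 && rst.getD (edges.getD i 0) 9 == 1 &&
        rst.getD (edges.getD (i + 1) 0) 9 == 0 then
      if count.getD (edges.getD i 0) 9 != 0 then loopA rst count edges is else true
    else loopA rst count edges is

def check_mid_stream_reset (series : List (String × List Int)) : Bool :=
  -- the all(k in series …) guard, then the lookups (keys are present, so getD's [] is never read)
  if (PySem.Dict.mk series).contains "clk" && (PySem.Dict.mk series).contains "rst" &&
      (PySem.Dict.mk series).contains "count" then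
    let clk := (pvLookupA series "clk").getD []
    let rst := (pvLookupA series "rst").getD []
    let count := (pvLookupA series "count").getD []
    let edges := risingEdges clk
    loopA rst count edges (List.range' 1 (edges.length - 2))
  else false

-- ===== PORT B =====
-- dict lookup (first match on the association list, as for a Python dict)
def pvLookupB (series : List (String × List Int)) (k : String) : Option (List Int) :=
  (PySem.Dict.mk series).get? k

-- single pass over clk positions, carrying the last two edge indices
def bGo (clk rst count : List Int) : List Nat → Option Nat → Option Nat → Bool
  | [], _, _ => false
  | i :: is, p2, p1 =>
    if clk.getD (i - 1) 9 == 0 && clk.getD i 9 == 1 then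
      match p2, p1 with
      | some a, some b =>
        if rst.getD a 9 == 0 && rst.getD b 9 == 1 && rst.getD i 9 == 0 && count.getD b 9 == 0 then
          true
        else bGo clk rst count is p1 (some i)
      | _, _ => bGo clk rst count is p1 (some i)
    else bGo clk rst count is p2 p1

-- the membership guard + three lookups, as an Option chain (False when a key is missing)
def check_mid_stream_reset_alt (series : List (String × List Int)) : Bool :=
  ((pvLookupB series "clk").bind fun clk =>
    (pvLookupB series "rst").bind fun rst =>
      (pvLookupB series "count").map fun count =>
        bGo clk rst count (List.range' 1 (clk.length - 1)) none none).getD false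

-- ===== PRECONDITION & SPEC =====
-- number of rising edges of a signal (shape property of the input, independent of the ports)
def pvEdgeCount (clk : List Int) : Nat :=
  (List.zip clk clk.tail).countP (fun p => p.1 == 0 && p.2 == 1)

-- dict lookup for stating Pre_ (independent of both ports)
def pvGetSig (series : List (String × List Int)) (k : String) : Option (List Int) :=
  (PySem.Dict.mk series).get? k

-- Pre_ excludes runs where Python A may index rst/count out of range (IndexError): whenever all
-- three keys are present and clk has at least 3 rising edges, rst and count must cover clk.
-- This is slightly conservative: it also excludes a few runs where A returns before reaching an
-- out-of-range index (see claim.json cites).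
def Pre_check_mid_stream_reset (series : List (String × List Int)) : Prop :=
  ((pvGetSig series "clk").all fun clk =>
    (pvGetSig series "rst").all fun rst =>
      (pvGetSig series "count").all fun count =>
        decide (pvEdgeCount clk < 3) ||
          (decide (clk.length ≤ rst.length) && decide (clk.length ≤ count.length))) = true
instance (series : List (String × List Int)) : Decidable (Pre_check_mid_stream_reset series) := by
  unfold Pre_check_mid_stream_reset; infer_instance

def pvWitness_check_mid_stream_reset : (List (String × List Int)) :=
  [("clk", [0, 1, 0, 1, 0, 1]), ("rst", [0, 0, 0, 1, 0, 0]), ("count", [1, 1, 1, 0, 1, 1])]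

def Spec_check_mid_stream_reset (series : List (String × List Int)) (out : Bool) : Prop := out = check_mid_stream_reset_alt series
instance (series : List (String × List Int)) (out : Bool) : Decidable (Spec_check_mid_stream_reset series out) := by unfold Spec_check_mid_stream_reset; infer_instance

-- ===== CLAIM (what is proved, stated in full; the proofs are below) =====
def Claim_equal_check_mid_stream_reset : Prop := ∀ (series : List (String × List Int)), Dom_check_mid_stream_reset series → Pre_check_mid_stream_reset series → Spec_check_mid_stream_reset series (check_mid_stream_reset series)

-- ===== LEMMAS AND PROOFS =====

-- the triple-test both loops perform on three edge indices
def pvCond (rst count : List Int) (a b e : Nat) : Bool :=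
  rst.getD a 9 == 0 && rst.getD b 9 == 1 && rst.getD e 9 == 0 && count.getD b 9 == 0

-- abstract scan over the stream of edge indices with a window of the last two
def scanE (rst count : List Int) : List Nat → Option Nat → Option Nat → Bool
  | [], _, _ => false
  | e :: es, some a, some b =>
    if pvCond rst count a b e then true else scanE rst count es (some b) (some e)
  | e :: es, _, p1 => scanE rst count es p1 (some e)

lemma bGo_eq_scanE (clk rst count : List Int) :
    ∀ (idxs : List Nat) (p2 p1 : Option Nat),
      bGo clk rst count idxs p2 p1 =
        scanE rst count (idxs.filter (fun i => clk.getD (i - 1) 9 == 0 && clk.getD i 9 == 1)) p2 p1 := by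
  intro idxs
  induction idxs with
  | nil => intro p2 p1; simp only [List.filter_nil, bGo, scanE]
  | cons i is ih =>
    intro p2 p1
    simp only [List.filter_cons]
    by_cases h : (clk.getD (i - 1) 9 == 0 && clk.getD i 9 == 1) = true
    · rw [if_pos h]
      simp only [bGo]
      rw [if_pos h]
      rcases p2 with _ | a <;> rcases p1 with _ | b <;> simp only [scanE]
      · exact ih none (some i)
      · exact ih (some b) (some i)
      · exact ih none (some i)
      · unfold pvCond
        by_cases hc : (rst.getD a 9 == 0 && rst.getD b 9 == 1 && rst.getD i 9 == 0 &&
            count.getD b 9 == 0) = true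
        · rw [if_pos hc, if_pos hc]
        · rw [if_neg hc, if_neg hc]; exact ih (some b) (some i)
    · rw [if_neg h]
      simp only [bGo]
      rw [if_neg h]
      exact ih p2 p1

lemma loopA_eq_scanE (rst count : List Int) :
    ∀ (n j : Nat) (edges : List Nat), edges.length = j + 2 + n →
      loopA rst count edges (List.range' (j + 1) n) =
        scanE rst count (edges.drop (j + 2)) (some (edges.getD j 0)) (some (edges.getD (j + 1) 0)) := by
  intro n
  induction n with
  | zero =>
    intro j edges hlen
    simp [loopA, List.drop_eq_nil_of_le, hlen.le, scanE]
  | succ m ih =>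
    intro j edges hlen
    have hj2 : j + 2 < edges.length := by omega
    have hdrop : edges.drop (j + 2) = edges[j + 2] :: edges.drop (j + 3) :=
      List.drop_eq_getElem_cons hj2
    have hg : edges.getD (j + 2) 0 = edges[j + 2] := List.getD_eq_getElem edges 0 hj2
    rw [List.range'_succ, hdrop]
    simp only [loopA, scanE, Nat.add_sub_cancel]
    rw [show edges.getD (j + 1 + 1) 0 = edges[j + 2] from hg]
    set a := edges.getD j 0 with ha
    set b := edges.getD (j + 1) 0 with hb
    set e := edges[j + 2] with he
    by_cases hc : pvCond rst count a b e = true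
    · rw [if_pos hc]
      have hc' := hc
      unfold pvCond at hc'
      simp only [Bool.and_eq_true] at hc'
      rw [if_pos (by simp only [Bool.and_eq_true]; exact ⟨⟨hc'.1.1.1, hc'.1.1.2⟩, hc'.1.2⟩)]
      rw [if_neg (by simp only [bne_iff_ne, ne_eq, not_not]; exact eq_of_beq hc'.2)]
    · rw [if_neg hc]
      have ih' := ih (j + 1) edges (by omega)
      rw [show edges.getD (j + 1 + 1) 0 = e from hg,
        show List.drop (j + 1 + 2) edges = List.drop (j + 3) edges from rfl, ← hb] at ih'
      rw [← ih']
      unfold pvCond at hc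
      by_cases h1 : (rst.getD a 9 == 0 && rst.getD b 9 == 1 && rst.getD e 9 == 0) = true
      · rw [if_pos h1]
        have h2 : (count.getD b 9 != 0) = true := by
          cases hD : (count.getD b 9 == 0) with
          | true => exact absurd (by rw [Bool.and_eq_true]; exact ⟨h1, hD⟩) hc
          | false => simp [bne]; simpa using hD
        rw [if_pos h2]
      · rw [if_neg h1]

lemma scanE_start (rst count : List Int) :
    ∀ (edges : List Nat),
      scanE rst count edges none none =
        loopA rst count edges (List.range' 1 (edges.length - 2)) := by
  intro edges
  match edges with
  | [] => simp [scanE, loopA]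
  | [a] => simp [scanE, loopA]
  | a :: b :: rest =>
    have h := loopA_eq_scanE rst count rest.length 0 (a :: b :: rest) (by simp; omega)
    simp only [scanE]
    simp only [List.length_cons] at h ⊢
    rw [show rest.length + 1 + 1 - 2 = rest.length by omega]
    rw [h]
    simp

lemma ports_eq (series : List (String × List Int)) :
    check_mid_stream_reset series = check_mid_stream_reset_alt series := by
  unfold check_mid_stream_reset check_mid_stream_reset_alt
  have hAB : pvLookupA = pvLookupB := rfl
  rw [hAB]
  have hc : ∀ k, (PySem.Dict.mk series).contains k = (pvLookupB series k).isSome := fun k =>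
    PySem.Dict.contains_eq_isSome_get? (PySem.Dict.mk series) k
  rcases h1 : pvLookupB series "clk" with _ | clk <;>
    rcases h2 : pvLookupB series "rst" with _ | rst <;>
      rcases h3 : pvLookupB series "count" with _ | count <;>
        simp [hc, h1, h2, h3]
  rw [bGo_eq_scanE, scanE_start]
  rfl

-- ===== VERDICT (by name: the statement is the Claim_ definition above) =====
theorem check_mid_stream_reset_spec : Claim_equal_check_mid_stream_reset := by
  intro series _ _
  unfold Spec_check_mid_stream_reset
  exact ports_eq series
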